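-- pv_equiv track=rewrite | github.com/ekoka/code-drills | lc/202508/lc135.py | rating_linearization
-- ===== SOURCE A (Python) =====
-- def rating_linearization(ratings):
--     n = len(ratings)
--     res = [[] for _ in ratings]
--     # i depends on j
--     for i in range(1, n):
--         if ratings[i-1] < ratings[i]:
--             res[i].append(i-1)
--         elif ratings[i-1] > ratings[i]:
--             res[i-1].append(i)
--     return res
-- ===== SOURCE B (Python) =====
-- def rating_linearization(ratings):
--     n = len(ratings)
--     res = []
--     for k in range(n):
--         deps = []
--         if k > 0 and ratings[k - 1] < ratings[k]:
--             deps.append(k - 1)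
--         if k + 1 < n and ratings[k + 1] < ratings[k]:
--             deps.append(k + 1)
--         res.append(deps)
--     return res
-- ===== Notes on version B (the rewrite author's own statement) =====
-- stated objective: alternative
-- what changed: Edge-centric pass that mutates res at two changing indices is replaced by a node-centric construction: each res[k] is built directly from its two neighbors, so no index mutation of prebuilt lists is needed.
import Mathlib
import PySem

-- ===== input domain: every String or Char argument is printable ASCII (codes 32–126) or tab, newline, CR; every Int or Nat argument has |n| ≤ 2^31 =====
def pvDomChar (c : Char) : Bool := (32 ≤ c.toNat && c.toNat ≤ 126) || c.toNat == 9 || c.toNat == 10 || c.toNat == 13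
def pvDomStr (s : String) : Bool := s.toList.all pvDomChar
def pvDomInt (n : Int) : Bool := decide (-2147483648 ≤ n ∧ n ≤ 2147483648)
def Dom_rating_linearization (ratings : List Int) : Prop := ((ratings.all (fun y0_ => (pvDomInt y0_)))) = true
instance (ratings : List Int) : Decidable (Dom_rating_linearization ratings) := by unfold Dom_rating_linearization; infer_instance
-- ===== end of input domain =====

-- B replaces A's edge-centric pass (mutating res at two moving indices) by a
-- node-centric construction of each res[k] from its two neighbors; objective: alternative.


-- ===== PORT A =====
-- res[i].append(v): append v to the list at index i (in-range in A's loop)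
def pvAppendAt (res : List (List Int)) (i : Nat) (v : Int) : List (List Int) :=
  match res, i with
  | [], _ => []
  | l :: ls, 0 => (l ++ [v]) :: ls
  | l :: ls, Nat.succ j => l :: pvAppendAt ls j v

-- the body of A's for-loop (one iteration, index i)
def pvStep (ratings : List Int) (res : List (List Int)) (i : Int) : List (List Int) :=
  let a := (PySem.List.pyGet? ratings (i - 1)).getD 0
  let b := (PySem.List.pyGet? ratings i).getD 0
  if a < b then pvAppendAt res i.toNat (i - 1)
  else if b < a then pvAppendAt res (i - 1).toNat i
  else res

def rating_linearization (ratings : List Int) : List (List Int) :=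
  let n : Int := ratings.length
  let res : List (List Int) := ratings.map (fun _ => [])
  (PySem.List.pyRange 1 n 1).foldl (pvStep ratings) res

-- ===== PORT B =====
-- deps for one node k: left neighbor first, then right neighbor (B's two appends)
def pvLeftDep (ratings : List Int) (k : Nat) : List Int :=
  if 0 < k ∧ ratings.getD (k - 1) 0 < ratings.getD k 0 then [(k : Int) - 1] else []

def pvRightDep (ratings : List Int) (k : Nat) : List Int :=
  if k + 1 < ratings.length ∧ ratings.getD (k + 1) 0 < ratings.getD k 0 then [(k : Int) + 1] else []

def rating_linearization_alt (ratings : List Int) : List (List Int) :=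
  (List.range ratings.length).map (fun k => pvLeftDep ratings k ++ pvRightDep ratings k)

-- ===== PRECONDITION & SPEC =====
def Spec_rating_linearization (ratings : List Int) (out : List (List Int)) : Prop := out = rating_linearization_alt ratings
instance (ratings : List Int) (out : List (List Int)) : Decidable (Spec_rating_linearization ratings out) := by unfold Spec_rating_linearization; infer_instance

-- ===== CLAIM (what is proved, stated in full; the proofs are below) =====
def Claim_equal_rating_linearization : Prop := ∀ (ratings : List Int), Dom_rating_linearization ratings → Spec_rating_linearization ratings (rating_linearization ratings)

-- ===== LEMMAS AND PROOFS =====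

theorem pvAppendAt_append (pre : List (List Int)) (rest : List (List Int)) (j : Nat) (v : Int) :
    pvAppendAt (pre ++ rest) (pre.length + j) v = pre ++ pvAppendAt rest j v := by
  induction pre with
  | nil => simp
  | cons x xs ih => simpa [pvAppendAt, Nat.succ_add] using ih

def pvIdx (j : Nat) : Int := (j : Int) + 1

-- the invariant: after processing i = 1 .. t, the prefix of length t is final,
-- slot t has only its left dependency, the rest is still empty
theorem pv_inv (ratings : List Int) (t : Nat) (ht : t + 1 ≤ ratings.length) :
    ((List.range t).map pvIdx).foldl (pvStep ratings) (ratings.map (fun _ => [])) =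
    (List.range t).map (fun k => pvLeftDep ratings k ++ pvRightDep ratings k)
      ++ [pvLeftDep ratings t] ++ List.replicate (ratings.length - 1 - t) [] := by
  induction t with
  | zero =>
      cases ratings with
      | nil => simp at ht
      | cons r rs => simp [pvLeftDep, List.map_const']
  | succ t ih =>
      rw [List.range_succ, List.map_append, List.foldl_append, ih (by omega)]
      have hget : ∀ (m : Nat), m < ratings.length →
          (PySem.List.pyGet? ratings ((m : Int))).getD 0 = ratings.getD m 0 := by
        intro m hm
        simp [PySem.List.pyGet?_natCast, List.getD]
      have h1 : ((t : Int) + 1 - 1) = (t : Int) := by omega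
      have h2 : (((t : Int) + 1)).toNat = t + 1 := by omega
      have h3 : ((t : Int)).toNat = t := by omega
      have hat : (PySem.List.pyGet? ratings ((t : Int))).getD 0 = ratings.getD t 0 :=
        hget t (by omega)
      have hat1 : (PySem.List.pyGet? ratings ((t : Int) + 1)).getD 0 = ratings.getD (t + 1) 0 := by
        have := hget (t + 1) (by omega)
        simpa [Nat.cast_add] using this
      simp only [List.map_cons, List.map_nil, List.foldl_cons, List.foldl_nil, pvStep, pvIdx,
        h1, h2, h3, hat, hat1]
      have hlenpref : ((List.range t).map (fun k => pvLeftDep ratings k ++ pvRightDep ratings k)).length = t := by simp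
      rcases lt_trichotomy (ratings.getD t 0) (ratings.getD (t + 1) 0) with hlt | heq | hgt
      · -- a < b : append t to res[t+1] (= first empty slot); rightDep t = []
        rw [if_pos hlt]
        have hr : ratings.length - 1 - t = (ratings.length - 1 - (t + 1)) + 1 := by omega
        rw [hr, List.replicate_succ]
        have hRt : pvRightDep ratings t = [] := by
          simp only [pvRightDep]; rw [if_neg]; rintro ⟨-, h⟩; omega
        have hLt1 : pvLeftDep ratings (t + 1) = [(t : Int)] := by
          simp only [pvLeftDep]
          rw [if_pos ⟨by omega, by simpa using hlt⟩]
          simp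
        have happ := pvAppendAt_append
          ((List.range t).map (fun k => pvLeftDep ratings k ++ pvRightDep ratings k)
            ++ [pvLeftDep ratings t])
          ([] :: List.replicate (ratings.length - 1 - (t + 1)) []) 0 ((t : Int))
        have hl : (((List.range t).map (fun k => pvLeftDep ratings k ++ pvRightDep ratings k)
            ++ [pvLeftDep ratings t]).length) + 0 = t + 1 := by simp [hlenpref]
        rw [hl] at happ
        rw [happ]
        simp [pvAppendAt, hRt, hLt1]
      · -- equal: nothing appended; rightDep t = [] and leftDep (t+1) = []
        rw [if_neg (by rw [heq]; exact lt_irrefl _), if_neg (by rw [heq]; exact lt_irrefl _)]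
        have hr : ratings.length - 1 - t = (ratings.length - 1 - (t + 1)) + 1 := by omega
        rw [hr, List.replicate_succ]
        have hRt : pvRightDep ratings t = [] := by
          simp only [pvRightDep]; rw [if_neg]; rintro ⟨-, h⟩; rw [heq] at h; exact lt_irrefl _ h
        have hLt1 : pvLeftDep ratings (t + 1) = [] := by
          simp only [pvLeftDep]; rw [if_neg]; rintro ⟨-, h⟩
          rw [Nat.add_sub_cancel, heq] at h; exact lt_irrefl _ h
        simp [hRt, hLt1]
      · -- a > b : append t+1 to res[t]; leftDep (t+1) = []
        rw [if_neg (not_lt.mpr (le_of_lt hgt)), if_pos hgt]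
        have hRt : pvRightDep ratings t = [(t : Int) + 1] := by
          simp only [pvRightDep]
          rw [if_pos ⟨by omega, by simpa using hgt⟩]
        have hLt1 : pvLeftDep ratings (t + 1) = [] := by
          simp only [pvLeftDep]; rw [if_neg]; rintro ⟨-, h⟩
          rw [Nat.add_sub_cancel] at h; exact absurd h (not_lt.mpr (le_of_lt hgt))
        have happ := pvAppendAt_append
          ((List.range t).map (fun k => pvLeftDep ratings k ++ pvRightDep ratings k))
          ([pvLeftDep ratings t] ++ List.replicate (ratings.length - 1 - t) []) 0 ((t : Int) + 1)
        have hl : (((List.range t).map (fun k => pvLeftDep ratings k ++ pvRightDep ratings k)).length) + 0 = t := by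
          simp [hlenpref]
        rw [hl] at happ
        rw [← List.append_assoc] at happ
        rw [happ]
        have hr : ratings.length - 1 - t = (ratings.length - 1 - (t + 1)) + 1 := by omega
        rw [hr, List.replicate_succ]
        simp [pvAppendAt, hRt, hLt1]

-- ===== VERDICT (by name: the statement is the Claim_ definition above) =====
theorem rating_linearization_spec : Claim_equal_rating_linearization := by
  intro ratings _
  unfold Spec_rating_linearization rating_linearization rating_linearization_alt
  cases hn : ratings.length with
  | zero =>
      have : ratings = [] := List.length_eq_zero_iff.mp hn
      subst this
      simp [PySem.List.pyRange_one_eq_nil]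
  | succ m =>
      have hrange : PySem.List.pyRange 1 (((m + 1 : Nat) : Int)) 1 = (List.range m).map pvIdx := by
        rw [PySem.List.pyRange_one]
        have h : ((((m + 1 : Nat) : Int)) - 1).toNat = m := by omega
        rw [h]
        exact List.map_congr_left (fun k _ => by simp [pvIdx, Int.add_comm])
      simp only [hrange]
      rw [pv_inv ratings m (by omega)]
      have hRm : pvRightDep ratings m = [] := by
        simp only [pvRightDep]; rw [if_neg]; rintro ⟨h, -⟩; omega
      rw [hn, (by omega : m + 1 - 1 - m = 0), List.replicate_zero, List.range_succ, List.map_append]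
      simp [hRm]
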